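-- pv_equiv track=rewrite | github.com/OLKorneva/py_codewars | Check_three_and_two.py | check_three_and_two
-- ===== SOURCE A (Python) =====
-- def check_three_and_two(array):
--     a, b, c = 0, 0, 0
--     for item in array:
--         if item == 'a':
--             a += 1
--         elif item == 'b':
--             b += 1
--         elif item == 'c':
--             c += 1
--     return 3 in (a, b, c) and 2 in (a, b, c)
-- ===== SOURCE B (Python) =====
-- def check_three_and_two(array):
--     # keep only the three tracked letters, then repeatedly peel off one
--     # distinct element's whole group by partitioning, recording run sizes
--     arr = [x for x in array if x in ('a', 'b', 'c')]
--     runs = []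
--     while arr:
--         rest = [y for y in arr if y != arr[0]]
--         runs.append(len(arr) - len(rest))
--         arr = rest
--     return 3 in runs and 2 in runs
-- ===== Notes on version B (the rewrite author's own statement) =====
-- stated objective: alternative
-- what changed: Instead of A's single pass maintaining three named counters in an elif chain, B filters to the tracked letters and then repeatedly partitions the remaining list on its first element, recording each distinct element's group size, and tests membership of 3 and 2 in the resulting run-size list.
import Mathlib
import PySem

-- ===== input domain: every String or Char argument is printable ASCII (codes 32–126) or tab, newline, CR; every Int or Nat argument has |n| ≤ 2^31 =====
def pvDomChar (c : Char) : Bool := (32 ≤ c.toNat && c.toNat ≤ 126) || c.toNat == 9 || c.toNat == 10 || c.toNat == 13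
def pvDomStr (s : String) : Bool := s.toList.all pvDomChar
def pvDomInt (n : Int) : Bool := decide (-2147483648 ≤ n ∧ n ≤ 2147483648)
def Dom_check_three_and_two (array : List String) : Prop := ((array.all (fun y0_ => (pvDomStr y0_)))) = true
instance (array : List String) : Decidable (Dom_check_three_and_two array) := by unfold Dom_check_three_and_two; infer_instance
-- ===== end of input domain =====

-- B replaces A's single pass with three named counters (elif chain) by a
-- filter-then-partition scheme: repeatedly split off the group of the first
-- element and record the group sizes (objective: alternative).

-- ===== PORT A =====
-- the body of A's for-loop: one elif chain updating the three counters
def ctStep (acc : Int × Int × Int) (item : String) : Int × Int × Int :=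
  if item == "a" then (acc.1 + 1, acc.2.1, acc.2.2)
  else if item == "b" then (acc.1, acc.2.1 + 1, acc.2.2)
  else if item == "c" then (acc.1, acc.2.1, acc.2.2 + 1)
  else acc

def check_three_and_two (array : List String) : Bool :=
  let s := array.foldl ctStep (0, 0, 0)
  let (a, b, c) := s
  ((3 : Int) == a || (3 : Int) == b || (3 : Int) == c) &&
  ((2 : Int) == a || (2 : Int) == b || (2 : Int) == c)

-- ===== PORT B =====
-- B's while-loop: peel off the first element's whole group, record its size
def pvRuns (arr : List String) : List Int :=
  match arr with
  | [] => []
  | x :: xs =>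
    let rest := (x :: xs).filter (fun y => y != x)
    (((x :: xs).length : Int) - (rest.length : Int)) :: pvRuns rest
termination_by arr.length
decreasing_by
  simp only [List.filter_cons, bne_self_eq_false, List.length_cons]
  exact Nat.lt_succ_of_le (List.length_filter_le _ _)

def check_three_and_two_alt (array : List String) : Bool :=
  let arr := array.filter (fun x => ["a", "b", "c"].contains x)
  let runs := pvRuns arr
  runs.contains 3 && runs.contains 2

-- ===== PRECONDITION & SPEC =====
def Spec_check_three_and_two (array : List String) (out : Bool) : Prop := out = check_three_and_two_alt array
instance (array : List String) (out : Bool) : Decidable (Spec_check_three_and_two array out) := by unfold Spec_check_three_and_two; infer_instance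

-- ===== CLAIM (what is proved, stated in full; the proofs are below) =====
def Claim_equal_check_three_and_two : Prop := ∀ (array : List String), Dom_check_three_and_two array → Spec_check_three_and_two array (check_three_and_two array)

-- ===== LEMMAS AND PROOFS =====

-- A's fold computes exactly the three occurrence counts.
theorem fold_counts (array : List String) (a b c : Int) :
    array.foldl ctStep (a, b, c)
    = (a + (array.count "a" : Int), b + (array.count "b" : Int), c + (array.count "c" : Int)) := by
  induction array generalizing a b c with
  | nil => simp
  | cons x xs ih =>
    rw [List.foldl_cons, ih]
    simp only [ctStep, List.count_cons, beq_iff_eq]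
    by_cases hxa : x = "a" <;> by_cases hxb : x = "b" <;> by_cases hxc : x = "c" <;>
      simp_all <;> ring

-- filtering never changes the count of an element the predicate keeps
theorem count_filter_pos (p : String → Bool) (y : String) (h : p y = true)
    (l : List String) : (l.filter p).count y = l.count y := by
  induction l with
  | nil => simp
  | cons a l ih =>
    by_cases hay : a = y
    · subst hay; simp [h, ih]
    · by_cases hpa : p a = true <;>
        simp [hpa, hay, ih]

-- filtering out x never changes the count of y ≠ x
theorem count_filter_ne (x y : String) (h : y ≠ x) (l : List String) :
    (l.filter (fun z => z != x)).count y = l.count y :=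
  count_filter_pos _ _ (by simp [h]) l

-- the size of the peeled-off group equals the count of the pivot element
theorem head_run_val (x : String) (xs : List String) :
    (((x :: xs).length : Int)) - ((((x :: xs).filter (fun y => y != x)).length : Int))
      = ((x :: xs).count x : Int) := by
  have key : ∀ l : List String, l.count x + (l.filter (fun y => y != x)).length = l.length := by
    intro l
    induction l with
    | nil => simp
    | cons a l ih =>
      by_cases hax : a = x <;>
        simp [hax] <;> omega
  have := key (x :: xs)
  omega

-- the run-size list of arr holds exactly the counts of arr's elements
theorem runs_mem (arr : List String) : ∀ k : Int,
    k ∈ pvRuns arr ↔ ∃ x ∈ arr, (arr.count x : Int) = k := by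
  induction arr using pvRuns.induct with
  | case1 => simp [pvRuns]
  | case2 x xs rest ih =>
    intro k
    rw [pvRuns, List.mem_cons]
    constructor
    · rintro (hk | hk)
      · exact ⟨x, List.mem_cons_self, by rw [hk]; exact (head_run_val x xs).symm⟩
      · obtain ⟨y, hy, hc⟩ := (ih k).mp hk
        have hmem := List.mem_filter.mp hy
        have hne : y ≠ x := by simpa using hmem.2
        refine ⟨y, hmem.1, ?_⟩
        rwa [count_filter_ne x y hne] at hc
    · rintro ⟨y, hy, hc⟩
      by_cases hyx : y = x
      · subst hyx; left; rw [head_run_val]; exact hc.symm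
      · right
        refine (ih k).mpr ⟨y, List.mem_filter.mpr ⟨hy, by simp [hyx]⟩, ?_⟩
        rwa [count_filter_ne x y hyx]

-- for a nonzero k, k is a run size of the filtered list iff one of the three
-- tracked letters occurs k times in the original list
theorem runs_filtered_iff (array : List String) (k : Int) (hk : k ≠ 0) :
    k ∈ pvRuns (array.filter (fun x => ["a", "b", "c"].contains x)) ↔
      ((array.count "a" : Int) = k ∨ (array.count "b" : Int) = k ∨
        (array.count "c" : Int) = k) := by
  rw [runs_mem]
  constructor
  · rintro ⟨y, hy, hc⟩
    have hmem := List.mem_filter.mp hy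
    have h3 : y = "a" ∨ y = "b" ∨ y = "c" := by simpa using hmem.2
    rw [count_filter_pos _ _ hmem.2] at hc
    rcases h3 with h | h | h <;> subst h <;> simp [hc]
  · have step : ∀ y : String, (["a", "b", "c"].contains y) = true →
        (array.count y : Int) = k →
        ∃ x ∈ array.filter (fun x => ["a", "b", "c"].contains x),
          ((array.filter (fun x => ["a", "b", "c"].contains x)).count x : Int) = k := by
      intro y hp hc
      have hcnt : (array.filter (fun x => ["a", "b", "c"].contains x)).count y
          = array.count y := count_filter_pos _ _ hp array
      have hpos : 0 < (array.filter (fun x => ["a", "b", "c"].contains x)).count y := by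
        omega
      exact ⟨y, List.count_pos_iff.mp hpos, by omega⟩
    rintro (h | h | h)
    · exact step "a" (by decide) h
    · exact step "b" (by decide) h
    · exact step "c" (by decide) h

-- ===== VERDICT (by name: the statement is the Claim_ definition above) =====
theorem check_three_and_two_spec : Claim_equal_check_three_and_two := by
  intro array _
  unfold Spec_check_three_and_two check_three_and_two check_three_and_two_alt
  have hA := fold_counts array 0 0 0
  rw [hA]
  have h3 := runs_filtered_iff array 3 (by norm_num)
  have h2 := runs_filtered_iff array 2 (by norm_num)
  set L := array.filter (fun x => ["a", "b", "c"].contains x) with hL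
  simp only [zero_add]
  rw [Bool.eq_iff_iff]
  simp only [Bool.and_eq_true, Bool.or_eq_true, beq_iff_eq, List.contains_eq_mem,
    decide_eq_true_eq]
  constructor
  · rintro ⟨ha, hb⟩
    exact ⟨h3.mpr (by omega), h2.mpr (by omega)⟩
  · rintro ⟨ha, hb⟩
    have ha3 := h3.mp ha
    have hb2 := h2.mp hb
    exact ⟨by omega, by omega⟩
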